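-- pv_equiv track=rewrite | github.com/Gallopsled/pwntools | pwnlib/util/cyclic.py | de_bruijn
-- ===== SOURCE A (Python) =====
-- import string
--
-- def de_bruijn(alphabet = string.ascii_lowercase, n = None):
--     """de_bruijn(alphabet = string.ascii_lowercase, n = 4) -> generator
--
--     Generator for a sequence of unique substrings of length `n`. This is implemented using a
--     De Bruijn Sequence over the given `alphabet`.
--
--     The returned generator will yield up to ``len(alphabet)**n`` elements.
--
--     Arguments:
--         alphabet: List or string to generate the sequence over.
--         n(int): The length of subsequences that should be unique.
--     """
--     if n is None:
--         n = 4
--     k = len(alphabet)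
--     a = [0] * k * n
--     def db(t, p):
--         if t > n:
--             if n % p == 0:
--                 for j in range(1, p + 1):
--                     yield alphabet[a[j]]
--         else:
--             a[t] = a[t - p]
--             for c in db(t + 1, p):
--                 yield c
--
--             for j in range(a[t - p] + 1, k):
--                 a[t] = j
--                 for c in db(t + 1, t):
--                     yield c
--
--     return db(1,1)
-- ===== SOURCE B (Python) =====
-- import string
--
-- # Iterative FKM: explicit worklist of (t, p, value-to-write) frames instead of
-- # nested recursive generators; A returns a generator, B returns the list of
-- # the same yielded one-character strings.
-- def de_bruijn(alphabet = string.ascii_lowercase, n = None):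
--     if n is None:
--         n = 4
--     k = len(alphabet)
--     a = [0] * k * n
--     out = []
--     stack = [(1, 1, 0)]
--     while stack:
--         t, p, v = stack.pop()
--         a[t - 1] = v
--         if t > n:
--             if n % p == 0:
--                 for j in range(1, p + 1):
--                     out.append(alphabet[a[j]])
--         else:
--             w = a[t - p]
--             for j in range(k - 1, w, -1):
--                 stack.append((t + 1, t, j))
--             stack.append((t + 1, p, w))
--     return out
-- ===== Notes on version B (the rewrite author's own statement) =====
-- stated objective: alternative
-- what changed: Replaces A's nested recursive generators (each yielded character is re-yielded through up to n generator frames) by an iterative FKM necklace generation driven by an explicit worklist of (t,p,value) frames that appends each character to the output once; B returns the list of the characters A's generator yields.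
import Mathlib
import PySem

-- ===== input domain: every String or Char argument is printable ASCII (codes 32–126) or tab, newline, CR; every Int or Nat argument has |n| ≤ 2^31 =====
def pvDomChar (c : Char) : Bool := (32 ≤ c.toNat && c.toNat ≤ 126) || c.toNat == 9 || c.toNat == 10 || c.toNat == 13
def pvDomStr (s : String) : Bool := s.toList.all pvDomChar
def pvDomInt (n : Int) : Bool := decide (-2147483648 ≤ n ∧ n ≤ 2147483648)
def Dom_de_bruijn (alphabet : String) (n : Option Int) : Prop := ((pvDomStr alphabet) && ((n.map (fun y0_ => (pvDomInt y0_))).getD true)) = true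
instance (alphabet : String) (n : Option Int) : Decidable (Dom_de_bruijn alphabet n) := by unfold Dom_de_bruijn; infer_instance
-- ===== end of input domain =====

-- B replaces A's nested recursive generators by an iterative FKM loop over an explicit
-- worklist of (t, p, value) frames; A returns a generator, the equivalence is about the
-- list of characters it yields, which B returns as a list.

-- ===== PORT A =====
-- A-side helpers: the inner generator `db(t, p)`, with the mutated array `a` threaded
-- through (returned alongside the yielded output).  Loop counters t, p and array entries
-- are Nats (in the Python they are nonnegative ints here); array reads/writes use
-- getD/set, exact under Pre_ (all indices in range there); `range(x, y)` over these
-- nonnegative ints is ported as List.range' x (y - x).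
-- termination lemmas for the mutual recursion (named so the proof terms stay out of the bodies)
theorem pvDecA1 (N t : Nat) (h : ¬ t > N) : N + 2 - (t + 1) < N + 2 - t := by omega
theorem pvDecA2 (N t : Nat) (h : ¬ t > N) : N + 1 - t < N + 2 - t := by omega
theorem pvDecL1 (N t : Nat) (j : Nat) (rest : List Nat) : Prod.Lex (· < ·) (· < ·) (N + 2 - (t + 1), 0) (N + 1 - t, (j :: rest).length + 1) := by
  rw [show N + 2 - (t + 1) = N + 1 - t from Nat.succ_sub_succ_eq_sub (N + 1) t]
  exact Prod.Lex.right _ (Nat.succ_pos (j :: rest).length)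
theorem pvDecL2 (x j : Nat) (rest : List Nat) :
    Prod.Lex (· < ·) (· < ·) (x, rest.length + 1) (x, (j :: rest).length + 1) :=
  Prod.Lex.right _ (by simp)

mutual
def dbA (al : List Char) (k N : Nat) (t p : Nat) (a : List Nat) : List String × List Nat :=
  if t > N then
    (if N % p == 0 then (List.range' 1 p).map (fun j => String.ofList [al.getD (a.getD j 0) ' ']) else [], a)
  else
    let w := a.getD (t - p) 0
    let r1 := dbA al k N (t + 1) p (a.set t w)
    dbALoop al k N t (List.range' (w + 1) (k - (w + 1))) r1
termination_by (N + 2 - t, 0)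
decreasing_by
  · exact Prod.Lex.left _ _ (pvDecA1 N t (by assumption))
  · exact Prod.Lex.left _ _ (pvDecA2 N t (by assumption))

-- the `for j in range(a[t-p]+1, k)` loop of db
def dbALoop (al : List Char) (k N : Nat) (t : Nat) (js : List Nat) (st : List String × List Nat) : List String × List Nat :=
  match js with
  | [] => st
  | j :: rest =>
      let r := dbA al k N (t + 1) t (st.2.set t j)
      dbALoop al k N t rest (st.1 ++ r.1, r.2)
termination_by (N + 1 - t, js.length + 1)
decreasing_by
  · exact pvDecL1 N t j rest
  · exact pvDecL2 (N + 1 - t) j rest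
end

def de_bruijn (alphabet : String) (n : Option Int) : List String :=
  let nv : Int := n.getD 4
  let al := alphabet.toList
  let k := al.length
  let N := nv.toNat      -- exact under Pre_ (nv ≥ 1 there)
  (dbA al k N 1 1 (List.replicate (k * N) 0)).1

-- ===== PORT B =====
-- B-side helper: the `while stack:` loop.  The Lean recursion carries a fuel argument (a
-- port artifact: Python's while-loop has none; fuel (k+2)^(N+2) is proved sufficient in
-- runB_spec below, so it never runs out).  The stack is a head-is-top list; Python pushes
-- the j-frames in descending j and then (t+1,p,w), so the resulting stack, top to bottom,
-- is (t+1,p,w), the j-frames in ascending j, then the old stack — written as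
-- cons / map over an ascending range / append.
def runB (al : List Char) (k N : Nat) : Nat → List (Nat × Nat × Nat) → List Nat → List String → List String
  | _, [], _, out => out
  | 0, _ :: _, _, out => out
  | fuel + 1, (t, p, v) :: S, a, out =>
    let a1 := a.set (t - 1) v
    if t > N then
      runB al k N fuel S a1
        (if N % p == 0 then out ++ (List.range' 1 p).map (fun j => String.ofList [al.getD (a1.getD j 0) ' ']) else out)
    else
      let w := a1.getD (t - p) 0
      runB al k N fuel ((t + 1, p, w) :: ((List.range' (w + 1) (k - (w + 1))).map (fun j => (t + 1, t, j)) ++ S)) a1 out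

def de_bruijn_alt (alphabet : String) (n : Option Int) : List String :=
  let nv : Int := n.getD 4
  let al := alphabet.toList
  let k := al.length
  let N := nv.toNat
  runB al k N ((k + 2) ^ (N + 2)) [(1, 1, 0)] (List.replicate (k * N) 0) []

-- ===== PRECONDITION & SPEC =====
-- Pre_ excludes exactly the inputs on which the Python A raises IndexError
-- (alphabet of length ≤ 1, or n ≤ 0: the buffer [0]*k*n is then too short).
def Pre_de_bruijn (alphabet : String) (n : Option Int) : Prop :=
  2 ≤ alphabet.length ∧ 1 ≤ n.getD 4
instance (alphabet : String) (n : Option Int) : Decidable (Pre_de_bruijn alphabet n) := by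
  unfold Pre_de_bruijn; infer_instance
def pvWitness_de_bruijn : String × Option Int := ("ab", some 2)

def Spec_de_bruijn (alphabet : String) (n : Option Int) (out : List String) : Prop := out = de_bruijn_alt alphabet n
instance (alphabet : String) (n : Option Int) (out : List String) : Decidable (Spec_de_bruijn alphabet n out) := by unfold Spec_de_bruijn; infer_instance

-- ===== CLAIM (what is proved, stated in full; the proofs are below) =====
def Claim_equal_de_bruijn : Prop := ∀ (alphabet : String) (n : Option Int), Dom_de_bruijn alphabet n → Pre_de_bruijn alphabet n → Spec_de_bruijn alphabet n (de_bruijn alphabet n)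

-- ===== LEMMAS AND PROOFS =====

-- unfolding equations for the well-founded/mutual definitions
theorem dbA_gt (al : List Char) (k N t p : Nat) (a : List Nat) (h : t > N) :
    dbA al k N t p a
      = (if N % p == 0 then (List.range' 1 p).map (fun j => String.ofList [al.getD (a.getD j 0) ' ']) else [], a) := by
  rw [dbA.eq_def, if_pos h]

theorem dbA_le (al : List Char) (k N t p : Nat) (a : List Nat) (h : ¬ t > N) :
    dbA al k N t p a
      = dbALoop al k N t (List.range' (a.getD (t - p) 0 + 1) (k - (a.getD (t - p) 0 + 1)))
          (dbA al k N (t + 1) p (a.set t (a.getD (t - p) 0))) := by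
  rw [dbA.eq_def, if_neg h]

theorem dbALoop_nil (al : List Char) (k N t : Nat) (st : List String × List Nat) :
    dbALoop al k N t [] st = st := by
  rw [dbALoop.eq_def]

theorem dbALoop_cons (al : List Char) (k N t j : Nat) (rest : List Nat) (st : List String × List Nat) :
    dbALoop al k N t (j :: rest) st
      = dbALoop al k N t rest
          (st.1 ++ (dbA al k N (t + 1) t (st.2.set t j)).1, (dbA al k N (t + 1) t (st.2.set t j)).2) := by
  rw [dbALoop.eq_def]

-- What a stack of frames denotes: each frame (t,p,v) writes v at position t-1 and then
-- runs A's generator db(t,p), the array being threaded left to right.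
def specOut (al : List Char) (k N : Nat) : List (Nat × Nat × Nat) → List Nat → List String
  | [], _ => []
  | (t, p, v) :: S, a =>
      let r := dbA al k N t p (a.set (t - 1) v)
      r.1 ++ specOut al k N S r.2

theorem specOut_nil (al : List Char) (k N : Nat) (a : List Nat) : specOut al k N [] a = [] := rfl

theorem specOut_cons (al : List Char) (k N t p v : Nat) (S : List (Nat × Nat × Nat)) (a : List Nat) :
    specOut al k N ((t, p, v) :: S) a
      = (dbA al k N t p (a.set (t - 1) v)).1 ++ specOut al k N S (dbA al k N t p (a.set (t - 1) v)).2 := rfl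

-- fuel measure of a stack
def muStack (k N : Nat) (S : List (Nat × Nat × Nat)) : Nat :=
  (S.map (fun f => (k + 2) ^ (N + 2 - f.1))).sum

theorem muStack_cons (k N : Nat) (f : Nat × Nat × Nat) (S : List (Nat × Nat × Nat)) :
    muStack k N (f :: S) = (k + 2) ^ (N + 2 - f.1) + muStack k N S := by
  simp [muStack]

theorem muStack_jmap (k N t : Nat) (js : List Nat) (S : List (Nat × Nat × Nat)) :
    muStack k N ((js.map (fun j => (t + 1, t, j))) ++ S)
      = js.length * (k + 2) ^ (N + 2 - (t + 1)) + muStack k N S := by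
  induction js with
  | nil => simp [muStack]
  | cons j rest ih =>
      rw [List.map_cons, List.cons_append, muStack_cons, ih, List.length_cons]
      ring

-- the `for j in range(...)` loop of A corresponds to the run of the j-frames B pushes
theorem dbALoop_spec (al : List Char) (k N t : Nat) :
    ∀ (js : List Nat) (o : List String) (a : List Nat) (S : List (Nat × Nat × Nat)),
      (dbALoop al k N t js (o, a)).1 ++ specOut al k N S (dbALoop al k N t js (o, a)).2
      = o ++ specOut al k N (js.map (fun j => (t + 1, t, j)) ++ S) a := by
  intro js
  induction js with
  | nil => intro o a S; rw [dbALoop_nil]; simp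
  | cons j rest ih =>
      intro o a S
      rw [dbALoop_cons, List.map_cons, List.cons_append, specOut_cons,
        show (t + 1) - 1 = t from by omega, ih]
      simp

-- the machine applied to any stack with enough fuel computes that stack's denotation
theorem runB_spec (al : List Char) (k N : Nat) :
    ∀ (fuel : Nat) (S : List (Nat × Nat × Nat)) (a : List Nat) (out : List String),
      muStack k N S ≤ fuel →
      runB al k N fuel S a out = out ++ specOut al k N S a := by
  intro fuel
  induction fuel with
  | zero =>
      intro S a out hmu
      cases S with
      | nil => simp [runB, specOut_nil]
      | cons f S' =>
          exfalso
          have h1 : 1 ≤ (k + 2) ^ (N + 2 - f.1) := Nat.one_le_pow _ _ (by omega)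
          rw [muStack_cons] at hmu
          omega
  | succ fuel ih =>
      intro S a out hmu
      cases S with
      | nil => simp [runB, specOut_nil]
      | cons f S' =>
          obtain ⟨t, p, v⟩ := f
          have hpow1 : 1 ≤ (k + 2) ^ (N + 2 - t) := Nat.one_le_pow _ _ (by omega)
          rw [muStack_cons] at hmu
          simp only at hmu
          by_cases h : t > N
          · rw [runB, if_pos h, ih _ _ _ (by omega), specOut_cons, dbA_gt _ _ _ _ _ _ h]
            by_cases hc : (N % p == 0) = true
            · simp [hc]
            · simp [hc]
          · -- t ≤ N
            rw [runB, if_neg h]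
            have hexp : N + 2 - (t + 1) = N + 1 - t := by omega
            have hX1 : 1 ≤ (k + 2) ^ (N + 1 - t) := Nat.one_le_pow _ _ (by omega)
            have hmu' : muStack k N ((t + 1, p, (a.set (t-1) v).getD (t - p) 0) ::
                ((List.range' ((a.set (t-1) v).getD (t - p) 0 + 1) (k - ((a.set (t-1) v).getD (t - p) 0 + 1))).map
                  (fun j => (t + 1, t, j)) ++ S')) ≤ fuel := by
              rw [muStack_cons, muStack_jmap]
              simp only [List.length_range', hexp]
              set w := (a.set (t-1) v).getD (t - p) 0
              have hsplit : (k + 2) ^ (N + 2 - t) = (k + 2) ^ (N + 1 - t) * (k + 2) := by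
                rw [show N + 2 - t = (N + 1 - t) + 1 from by omega, pow_succ]
              have hle : (k - (w + 1)) * (k + 2) ^ (N + 1 - t) ≤ k * (k + 2) ^ (N + 1 - t) :=
                Nat.mul_le_mul_right _ (by omega)
              have hk2 : (k + 2) ^ (N + 1 - t) * (k + 2)
                  = (k + 2) ^ (N + 1 - t) + k * (k + 2) ^ (N + 1 - t) + (k + 2) ^ (N + 1 - t) := by
                ring
              rw [hsplit, hk2] at hmu
              omega
            rw [ih _ _ _ hmu']
            rw [specOut_cons]
            rw [show (t + 1) - 1 = t from by omega]
            rw [specOut_cons, dbA_le _ _ _ _ _ _ h]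
            rw [dbALoop_spec]

theorem set_zero_replicate (m : Nat) : (List.replicate m (0:Nat)).set 0 0 = List.replicate m 0 := by
  cases m <;> simp [List.replicate]

theorem ports_agree (alphabet : String) (n : Option Int) :
    de_bruijn alphabet n = de_bruijn_alt alphabet n := by
  show (dbA alphabet.toList alphabet.toList.length (n.getD 4).toNat 1 1
          (List.replicate (alphabet.toList.length * (n.getD 4).toNat) 0)).1
      = runB alphabet.toList alphabet.toList.length (n.getD 4).toNat
          ((alphabet.toList.length + 2) ^ ((n.getD 4).toNat + 2)) [(1, 1, 0)]
          (List.replicate (alphabet.toList.length * (n.getD 4).toNat) 0) []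
  generalize alphabet.toList = al
  generalize (n.getD 4).toNat = N
  have hmu : muStack al.length N [(1, 1, 0)] ≤ (al.length + 2) ^ (N + 2) := by
    rw [muStack_cons]
    simp only [muStack, List.map_nil, List.sum_nil, Nat.add_zero]
    exact Nat.pow_le_pow_right (by omega) (by omega)
  rw [runB_spec al al.length N _ _ _ _ hmu, specOut_cons, specOut_nil,
    show (1:Nat) - 1 = 0 from by omega, set_zero_replicate]
  simp

-- ===== VERDICT (by name: the statement is the Claim_ definition above) =====
theorem de_bruijn_spec : Claim_equal_de_bruijn := by
  intro alphabet n _ _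
  unfold Spec_de_bruijn
  exact ports_agree alphabet n
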